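-- pv_equiv track=rewrite | github.com/th0mpyle/pydle | pydle/main.py | word_list_check
-- ===== SOURCE A (Python) =====
-- def word_list_check(guess, arr):
--     flag = 0
--     index = 0
--     for line in arr:
--         # if flag returns 1 then the program should run
--         # this is messy but the order is hard to change
--         index += 1
--         if guess == "":
--             flag = 3
--         elif guess in line:
--             flag = 1
--         elif len(guess) != 5:
--             flag = 2
--         else:
--             continue
--     return flag
-- ===== SOURCE B (Python) =====
-- def word_list_check(guess, arr):
--     if not arr:
--         return 0
--     if guess == "":
--         return 3
--     if any(guess in line for line in arr):
--         return 1
--     if len(guess) != 5: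
--         return 2
--     return 0
-- ===== Notes on version B (the rewrite author's own statement) =====
-- stated objective: simpler
-- what changed: Replaces A's per-line flag-overwriting loop (whose result for non-5-letter guesses depends only on the last line) with early returns: empty list -> 0, empty guess -> 3, guess found in any line -> 1 (short-circuit any()), wrong length -> 2, else 0; the unused index counter is dropped.
-- intended difference: On non-empty lists with a non-empty guess of length != 5 that occurs in some earlier line but not in the last line, A returns 2 (its flag is overwritten by every later line) while B returns 1, the intended 'found in the word list' answer. — e.g. on word_list_check("ab", ["ab", "xy"]): A returns 2, B returns 1
import Mathlib
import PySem

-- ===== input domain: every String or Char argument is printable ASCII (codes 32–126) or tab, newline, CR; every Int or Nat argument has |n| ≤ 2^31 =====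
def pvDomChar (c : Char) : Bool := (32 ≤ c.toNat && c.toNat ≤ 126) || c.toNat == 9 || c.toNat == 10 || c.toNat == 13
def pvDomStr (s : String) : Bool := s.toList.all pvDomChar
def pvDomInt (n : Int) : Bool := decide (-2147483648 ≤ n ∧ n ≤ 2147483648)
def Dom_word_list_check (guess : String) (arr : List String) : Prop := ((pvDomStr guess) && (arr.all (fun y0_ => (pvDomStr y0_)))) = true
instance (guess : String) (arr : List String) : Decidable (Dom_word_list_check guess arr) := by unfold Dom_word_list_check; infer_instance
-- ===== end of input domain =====

-- B replaces A's flag-overwriting loop with early returns (empty list -> 0, empty guess -> 3,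
-- found in any line -> 1, wrong length -> 2, else 0); intended difference D_ states where A differs.

-- ===== PORT A =====
-- state = (flag, index), exactly A's two mutable variables
def word_list_check (guess : String) (arr : List String) : Int :=
  (arr.foldl (fun (st : Int × Int) line =>
      let index := st.2 + 1
      if guess = "" then (3, index)
      else if PySem.Str.isIn guess line then (1, index)
      else if PySem.Str.len guess ≠ 5 then (2, index)
      else (st.1, index)) ((0 : Int), (0 : Int))).1

-- ===== PORT B =====
def word_list_check_alt (guess : String) (arr : List String) : Int :=
  if arr = [] then 0
  else if guess = "" then 3
  else if arr.any (fun line => PySem.Str.isIn guess line) then 1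
  else if PySem.Str.len guess ≠ 5 then 2
  else 0

-- ===== PRECONDITION & SPEC =====
-- On non-empty lists with a non-empty guess of length != 5 that occurs in some earlier line but
-- not in the last line, A returns 2 (its flag is overwritten by every later line) while B
-- returns 1, the intended "found in the word list" answer.
def D_word_list_check (guess : String) (arr : List String) : Prop :=
  arr ≠ [] ∧ guess ≠ "" ∧ PySem.Str.len guess ≠ 5 ∧
  PySem.Str.isIn guess (arr.getLastD "") = false ∧
  arr.dropLast.any (fun line => PySem.Str.isIn guess line) = true
instance (guess : String) (arr : List String) : Decidable (D_word_list_check guess arr) := by unfold D_word_list_check; infer_instance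

def Spec_word_list_check (guess : String) (arr : List String) (out : Int) : Prop := ¬ D_word_list_check guess arr → out = word_list_check_alt guess arr
instance (guess : String) (arr : List String) (out : Int) : Decidable (Spec_word_list_check guess arr out) := by unfold Spec_word_list_check; infer_instance

def pvDiffWitness_word_list_check : String × List String := ("ab", ["ab", "xy"])
def pvDiffWitnessOut_word_list_check : Int × Int := (2, 1)

-- ===== CLAIM (what is proved, stated in full; the proofs are below) =====
def Claim_unchanged_word_list_check : Prop := ∀ (guess : String) (arr : List String), Dom_word_list_check guess arr → Spec_word_list_check guess arr (word_list_check guess arr)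
def Claim_changed_word_list_check : Prop := Dom_word_list_check (pvDiffWitness_word_list_check.1) (pvDiffWitness_word_list_check.2) ∧ D_word_list_check (pvDiffWitness_word_list_check.1) (pvDiffWitness_word_list_check.2) ∧ word_list_check (pvDiffWitness_word_list_check.1) (pvDiffWitness_word_list_check.2) = pvDiffWitnessOut_word_list_check.1 ∧ word_list_check_alt (pvDiffWitness_word_list_check.1) (pvDiffWitness_word_list_check.2) = pvDiffWitnessOut_word_list_check.2 ∧ pvDiffWitnessOut_word_list_check.1 ≠ pvDiffWitnessOut_word_list_check.2
def Claim_exact_word_list_check : Prop := ∀ (guess : String) (arr : List String), Dom_word_list_check guess arr → D_word_list_check guess arr → word_list_check guess arr ≠ word_list_check_alt guess arr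

-- ===== LEMMAS AND PROOFS =====

-- abbreviation for A's loop step (proof-side only)
def pvStep (guess : String) (st : Int × Int) (line : String) : Int × Int :=
  let index := st.2 + 1
  if guess = "" then (3, index)
  else if PySem.Str.isIn guess line then (1, index)
  else if PySem.Str.len guess ≠ 5 then (2, index)
  else (st.1, index)

theorem pv_fold_empty_guess (arr : List String) (st : Int × Int) (h : arr ≠ []) :
    (arr.foldl (pvStep "") st).1 = 3 := by
  induction arr generalizing st with
  | nil => exact absurd rfl h
  | cons a t ih =>
      rw [List.foldl_cons]
      cases t with
      | nil => simp [pvStep]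
      | cons b u => exact ih _ (by simp)

theorem pv_fold_len5 (guess : String) (hg : guess ≠ "") (h5 : PySem.Str.len guess = 5)
    (arr : List String) (st : Int × Int) :
    (arr.foldl (pvStep guess) st).1 =
      if arr.any (fun line => PySem.Str.isIn guess line) then 1 else st.1 := by
  have h5' : ((guess.length : Int)) = 5 := h5
  induction arr generalizing st with
  | nil => simp
  | cons a t ih =>
      rw [List.foldl_cons, ih]
      by_cases hin : PySem.Chars.isIn guess.toList a.toList = true
      · simp [pvStep, hg, hin]
      · simp [pvStep, hg, hin, h5']

theorem pv_fold_other (guess : String) (hg : guess ≠ "") (h5 : PySem.Str.len guess ≠ 5)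
    (a : String) (t : List String) (st : Int × Int) :
    ((a :: t).foldl (pvStep guess) st).1 =
      if PySem.Str.isIn guess ((a :: t).getLast (by simp)) then 1 else 2 := by
  have h5' : ¬ ((guess.length : Int)) = 5 := h5
  induction t generalizing a st with
  | nil =>
      by_cases hin : PySem.Chars.isIn guess.toList a.toList = true <;>
        simp [pvStep, hg, hin, h5']
  | cons b u ih =>
      rw [List.foldl_cons]
      rw [ih b (pvStep guess st a)]
      congr 1

theorem pv_getLastD_eq (a : String) (t : List String) :
    (a :: t).getLastD "" = (a :: t).getLast (by simp) := by
  rw [List.getLastD_eq_getLast?, List.getLast?_eq_some_getLast (l := a :: t) (by simp)]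
  rfl

theorem pv_any_split (guess : String) (a : String) (t : List String) :
    (a :: t).any (fun line => PySem.Str.isIn guess line) =
      ((a :: t).dropLast.any (fun line => PySem.Str.isIn guess line)
        || PySem.Str.isIn guess ((a :: t).getLast (by simp))) := by
  conv_lhs => rw [← List.dropLast_append_getLast (l := a :: t) (by simp)]
  simp

theorem pv_A_val (guess : String) (arr : List String) (hg : guess ≠ "")
    (h5 : PySem.Str.len guess ≠ 5) (a : String) (t : List String) (harr : arr = a :: t) :
    word_list_check guess arr =
      if PySem.Str.isIn guess (arr.getLastD "") then 1 else 2 := by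
  subst harr
  unfold word_list_check
  rw [show (fun (st : Int × Int) line =>
      let index := st.2 + 1
      if guess = "" then (3, index)
      else if PySem.Str.isIn guess line then (1, index)
      else if PySem.Str.len guess ≠ 5 then (2, index)
      else (st.1, index)) = pvStep guess from rfl]
  rw [pv_fold_other guess hg h5 a t, pv_getLastD_eq]

-- ===== VERDICT (by name: the statement is the Claim_ definition above) =====
theorem word_list_check_spec : Claim_unchanged_word_list_check := by
  intro guess arr _
  unfold Spec_word_list_check
  intro hnD
  cases arr with
  | nil => rfl
  | cons a t =>
      by_cases hg : guess = ""
      · subst hg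
        unfold word_list_check word_list_check_alt
        rw [show (fun (st : Int × Int) line =>
            let index := st.2 + 1
            if ("" : String) = "" then (3, index)
            else if PySem.Str.isIn "" line then (1, index)
            else if PySem.Str.len "" ≠ 5 then (2, index)
            else (st.1, index)) = pvStep "" from rfl]
        rw [pv_fold_empty_guess (a :: t) ((0 : Int), (0 : Int)) (by simp)]
        simp
      · by_cases h5 : PySem.Str.len guess = 5
        · unfold word_list_check word_list_check_alt
          rw [show (fun (st : Int × Int) line =>
              let index := st.2 + 1
              if guess = "" then (3, index)
              else if PySem.Str.isIn guess line then (1, index)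
              else if PySem.Str.len guess ≠ 5 then (2, index)
              else (st.1, index)) = pvStep guess from rfl]
          rw [pv_fold_len5 guess hg h5]
          have h5' : ((guess.length : Int)) = 5 := h5
          simp [hg, h5']
        · -- len ≠ 5; ¬D means guess in last line, or in no earlier line
          rw [pv_A_val guess (a :: t) hg h5 a t rfl]
          unfold word_list_check_alt
          have h5' : ¬ ((guess.length : Int)) = 5 := h5
          rw [pv_any_split guess a t, pv_getLastD_eq]
          by_cases hlast : PySem.Chars.isIn guess.toList ((a :: t).getLast (by simp)).toList = true
          · simp [hg, hlast]
          · have hdropb : (a :: t).dropLast.any (fun line => PySem.Str.isIn guess line) = false := by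
              rw [Bool.eq_false_iff]
              intro hd
              exact hnD ⟨by simp, hg, h5, by
                rw [pv_getLastD_eq]; exact Bool.eq_false_iff.mpr hlast, hd⟩
            have hl : PySem.Chars.isIn guess.toList ((a :: t).getLast (by simp)).toList = false :=
              Bool.eq_false_iff.mpr hlast
            simp [PySem.Str.isIn, hg, h5', hl]
            simpa [PySem.Str.isIn] using hdropb

theorem word_list_check_changed : Claim_changed_word_list_check := by
  unfold Claim_changed_word_list_check; decide

theorem word_list_check_tight : Claim_exact_word_list_check := by
  intro guess arr _ hD
  obtain ⟨hne, hg, h5, hlast, hdrop⟩ := hD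
  obtain ⟨a, t, rfl⟩ := List.exists_cons_of_ne_nil hne
  rw [pv_A_val guess (a :: t) hg h5 a t rfl, hlast]
  unfold word_list_check_alt
  have hany : (a :: t).any (fun line => PySem.Str.isIn guess line) = true := by
    rw [pv_any_split guess a t, hdrop]
    simp
  rw [if_neg (by simp : ¬ (a :: t) = ([] : List String)), if_neg hg, if_pos hany]
  decide
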